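-- pv_equiv track=rewrite | github.com/Schimmenti/DarcyBethe | darcyfast.py | build_parents_recursive
-- ===== SOURCE A (Python) =====
-- def build_parents_recursive(source, parents,z, t):
--     n = source + 1
--     for idx in range(0, z):
--         parents[n] = source
--         if(t == 0):
--             n += 1
--         else:
--             n = build_parents_recursive(n, parents, z, t-1)
--     return n
-- ===== SOURCE B (Python) =====
-- def build_parents_recursive(source, parents, z, t):
--     counter = source + 1
--     stack = [(source, t)] * z
--     while stack:
--         parent, param = stack.pop()
--         parents[counter] = parent
--         counter += 1
--         if param != 0:
--             stack.extend([(counter - 1, param - 1)] * z)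
--     return counter
-- ===== Notes on version B (the rewrite author's own statement) =====
-- stated objective: alternative
-- what changed: Replaced the recursive depth-first builder by an iterative explicit-stack preorder traversal that keeps a single counter and pops (parent, remaining-depth) entries, pushing z child entries per internal node; same counter result and same in-place parent assignments.
-- outside the precondition, e.g. on build_parents_recursive(0, {}, 1, 4500): A returns 4502, B returns 4502; on build_parents_recursive(0, {}, 1, 20000): A raises RecursionError, B returns 20002; on build_parents_recursive(0, {}, 1, -1): A raises RecursionError, B does not finish within the time limit
import Mathlib
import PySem

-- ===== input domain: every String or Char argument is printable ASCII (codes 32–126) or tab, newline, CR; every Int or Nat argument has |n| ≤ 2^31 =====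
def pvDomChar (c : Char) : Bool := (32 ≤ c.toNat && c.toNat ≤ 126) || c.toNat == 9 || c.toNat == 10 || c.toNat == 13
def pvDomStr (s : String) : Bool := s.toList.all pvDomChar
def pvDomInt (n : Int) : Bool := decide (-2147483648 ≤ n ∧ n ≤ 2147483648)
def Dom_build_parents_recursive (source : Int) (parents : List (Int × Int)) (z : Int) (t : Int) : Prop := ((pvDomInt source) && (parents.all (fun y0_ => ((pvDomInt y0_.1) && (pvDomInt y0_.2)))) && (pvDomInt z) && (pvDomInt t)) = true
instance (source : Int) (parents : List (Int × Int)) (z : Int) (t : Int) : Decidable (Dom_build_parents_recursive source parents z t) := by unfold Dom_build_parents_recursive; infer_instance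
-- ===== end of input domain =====

-- B replaces the recursion by an explicit-stack preorder loop; it performs the same in-place
-- parents[...] writes as A (checked in Python), but both programs only WRITE that dict and the
-- returned counter never reads it, so the ports model the returned counter and do not thread the dict.

-- ===== PORT A =====
-- A's recursion on t (Pre_ guarantees 0 ≤ t whenever the loop runs, so t is carried as a Nat;
-- the state threaded through the range-loop is the counter n; the parents[n] = source write is
-- write-only and not modelled, see the header line).
def bprGo (z : Int) : Nat → Int → Int
  | tn, source =>
    (PySem.List.pyRange 0 z 1).foldl
      (fun n _ =>
        match tn with
        | 0 => n + 1                 -- if t == 0: n += 1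
        | Nat.succ t' => bprGo z t' n)  -- else: n = build_parents_recursive(n, parents, z, t-1)
      (source + 1)                   -- n = source + 1

def build_parents_recursive (source : Int) (parents : List (Int × Int)) (z : Int) (t : Int) : Int :=
  (bprGo z t.toNat source)

-- ===== PORT B =====
-- B's while-loop over the explicit stack of (parent, remaining-depth) entries; the stack top is
-- the list head; the parents[counter] = parent write is write-only and not modelled.
-- Termination: each entry of depth k weighs (z.toNat+1)^k; a pop removes more than its pushes add.
def bprLoop (z : Int) (counter : Int) : List (Int × Nat) → Int
  | [] => counter
  | (_parent, param) :: rest =>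
    match param with
    | 0 => bprLoop z (counter + 1) rest
    | Nat.succ k =>                  -- if param != 0: push z copies of (counter, param - 1)
      bprLoop z (counter + 1) (List.replicate z.toNat (counter, k) ++ rest)
  termination_by stack => (stack.map (fun e => (z.toNat + 1) ^ e.2)).sum
  decreasing_by
  · simp
  · simp [List.map_replicate, pow_succ]
    have h1 : 1 ≤ (z.toNat + 1) ^ k := Nat.one_le_pow _ _ (Nat.succ_pos _)
    nlinarith [h1]

def build_parents_recursive_alt (source : Int) (parents : List (Int × Int)) (z : Int) (t : Int) : Int :=
  bprLoop z (source + 1) (List.replicate z.toNat (source, t.toNat))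

-- ===== PRECONDITION & SPEC =====
-- Pre_ excludes, for z ≥ 1, negative t (A recurses forever) and large t (A's depth-first descent
-- exceeds the recursion limit and raises RecursionError); the 4000 bound is conservative against the
-- exact interpreter frame budget, so a band where A still returns (z = 1, t between 4000 and the
-- recursion limit) is excluded too — see the cite in the claim.
def Pre_build_parents_recursive (source : Int) (parents : List (Int × Int)) (z : Int) (t : Int) : Prop :=
  (0 ≤ t ∧ t < 4000) ∨ z ≤ 0
instance (source : Int) (parents : List (Int × Int)) (z : Int) (t : Int) : Decidable (Pre_build_parents_recursive source parents z t) := by unfold Pre_build_parents_recursive; infer_instance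

def pvWitness_build_parents_recursive : Int × (List (Int × Int)) × Int × Int := (0, [], 2, 1)

def Spec_build_parents_recursive (source : Int) (parents : List (Int × Int)) (z : Int) (t : Int) (out : Int) : Prop := out = build_parents_recursive_alt source parents z t
instance (source : Int) (parents : List (Int × Int)) (z : Int) (t : Int) (out : Int) : Decidable (Spec_build_parents_recursive source parents z t out) := by unfold Spec_build_parents_recursive; infer_instance

-- ===== CLAIM (what is proved, stated in full; the proofs are below) =====
def Claim_equal_build_parents_recursive : Prop := ∀ (source : Int) (parents : List (Int × Int)) (z : Int) (t : Int), Dom_build_parents_recursive source parents z t → Pre_build_parents_recursive source parents z t → Spec_build_parents_recursive source parents z t (build_parents_recursive source parents z t)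

-- ===== LEMMAS AND PROOFS =====

-- Counter effect of processing ONE node of remaining depth k at counter c:
-- count the node itself, then (if k > 0) run A's builder for its z children.
def bprOne (z : Int) (k : Nat) (c : Int) : Int :=
  match k with
  | 0 => c + 1
  | Nat.succ k' => bprGo z k' c

theorem foldl_const_eq_iterate {α β : Type} (g : α → α) :
    ∀ (l : List β) (init : α), l.foldl (fun st _ => g st) init = g^[l.length] init := by
  intro l
  induction l with
  | nil => intro init; simp
  | cons a l ih =>
      intro init
      rw [List.foldl_cons, List.length_cons, Function.iterate_succ_apply]
      exact ih _

theorem bprGo_eq_iterate (z : Int) (tn : Nat) (source : Int) :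
    bprGo z tn source
      = (bprOne z tn)^[(PySem.List.pyRange 0 z 1).length] (source + 1) := by
  rw [bprGo]
  cases tn with
  | zero => exact foldl_const_eq_iterate _ _ _
  | succ t' => exact foldl_const_eq_iterate _ _ _

theorem bprLoop_cons (z : Int) (k : Nat) :
    ∀ (parent c : Int) (rest : List (Int × Nat)),
      bprLoop z c ((parent, k) :: rest) = bprLoop z (bprOne z k c) rest := by
  induction k using Nat.strong_induction_on with
  | _ k ih =>
    intro parent c rest
    cases k with
    | zero => simp [bprLoop, bprOne]
    | succ k' =>
        rw [bprLoop, bprOne]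
        rw [bprGo_eq_iterate]
        -- processing m identical child entries = iterating bprOne m times
        have step : ∀ (m : Nat) (c0 : Int) (rest : List (Int × Nat)),
            bprLoop z c0 (List.replicate m (c, k') ++ rest)
              = bprLoop z ((bprOne z k')^[m] c0) rest := by
          intro m
          induction m with
          | zero => intro c0 rest; simp
          | succ m ihm =>
              intro c0 rest
              rw [List.replicate_succ, List.cons_append, ih k' (Nat.lt_succ_self _),
                Function.iterate_succ_apply]
              exact ihm _ _
        simp only [PySem.List.length_pyRange_one, Int.sub_zero]
        exact step z.toNat _ _

theorem bprLoop_replicate (z : Int) (k m : Nat) (src c : Int) :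
    bprLoop z c (List.replicate m (src, k)) = (bprOne z k)^[m] c := by
  induction m generalizing c with
  | zero => simp [bprLoop]
  | succ m ihm =>
      rw [List.replicate_succ, bprLoop_cons, Function.iterate_succ_apply]
      exact ihm _

-- ===== VERDICT (by name: the statement is the Claim_ definition above) =====
theorem build_parents_recursive_spec : Claim_equal_build_parents_recursive := by
  intro source parents z t _ _
  unfold Spec_build_parents_recursive build_parents_recursive build_parents_recursive_alt
  rw [bprGo_eq_iterate, bprLoop_replicate, PySem.List.length_pyRange_one]
  simp
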